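-- pv_equiv track=rewrite | github.com/ahmetcagriakca/pythondataintegrator | infrastructor/utils/PdiUtils.py | prepare_insert_row
-- ===== SOURCE A (Python) =====
-- def prepare_insert_row(extracted_datas, related_columns):
--     inserted_rows = []
--     for extracted_data in extracted_datas:
--         inserted_row = []
--         for related_column in related_columns:
--             inserted_row.append(extracted_data[related_columns.index(related_column)])
--         inserted_rows.append(tuple(inserted_row))
--     return inserted_rows
-- ===== SOURCE B (Python) =====
-- def prepare_insert_row(extracted_datas, related_columns):
--     # Stage 1: build the selected COLUMNS, one per entry of related_columns,
--     # resolving duplicates with a first-occurrence dict (no .index scans).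
--     seen = {}
--     columns = []
--     for j, c in enumerate(related_columns):
--         i = seen.setdefault(c, j)
--         columns.append([data[i] for data in extracted_datas])
--     # Stage 2: transpose the column matrix into one tuple per input row.
--     return [tuple(col[r] for col in columns) for r in range(len(extracted_datas))]
-- ===== Notes on version B (the rewrite author's own statement) =====
-- stated objective: alternative
-- what changed: B works column-wise in two stages: it builds the list of selected columns (resolving duplicate column names via a first-occurrence dict filled with setdefault, replacing A's repeated .index scans) and then explicitly transposes that column matrix into row tuples, instead of A's row-by-row gather.
-- outside the precondition, e.g. on prepare_insert_row([[1]], [5, 6]): A raises IndexError, B raises IndexError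
import Mathlib
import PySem

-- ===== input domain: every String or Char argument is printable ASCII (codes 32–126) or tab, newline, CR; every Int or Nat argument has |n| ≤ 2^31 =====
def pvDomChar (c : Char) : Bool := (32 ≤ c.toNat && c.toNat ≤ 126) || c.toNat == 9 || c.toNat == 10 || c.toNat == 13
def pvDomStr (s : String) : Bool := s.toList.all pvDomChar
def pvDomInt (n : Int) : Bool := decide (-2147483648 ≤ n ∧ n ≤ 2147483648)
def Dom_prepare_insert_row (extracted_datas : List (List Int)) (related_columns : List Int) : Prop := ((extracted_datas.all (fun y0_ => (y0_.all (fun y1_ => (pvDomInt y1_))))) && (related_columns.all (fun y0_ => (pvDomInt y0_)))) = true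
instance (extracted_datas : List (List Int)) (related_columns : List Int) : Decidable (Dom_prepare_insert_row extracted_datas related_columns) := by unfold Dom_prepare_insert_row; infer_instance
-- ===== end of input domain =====

-- B builds the selected columns (first-occurrence dict via setdefault) and then transposes that
-- column matrix into row tuples, instead of A's row-by-row gather with repeated .index scans
-- (objective: alternative two-stage column-wise algorithm).

-- ===== PORT A =====
-- row-major: for each row, for each column value, .index lookup into related_columns and gather
def prepare_insert_row (extracted_datas : List (List Int)) (related_columns : List Int) : List (List Int) :=
  extracted_datas.foldl (fun inserted_rows extracted_data =>
    inserted_rows ++ [related_columns.foldl (fun inserted_row related_column =>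
      inserted_row ++ [(PySem.List.pyGet? extracted_data
        (((PySem.List.index? related_columns related_column).getD 0 : Nat) : Int)).getD 0]) []]) []

-- ===== PORT B =====
-- stage 1: fold over enumerate(related_columns) building (seen dict, columns); stage 2: transpose
def prepare_insert_row_alt (extracted_datas : List (List Int)) (related_columns : List Int) : List (List Int) :=
  let st := (PySem.List.enumerate related_columns 0).foldl
    (fun (st : PySem.Dict Int Int × List (List Int)) jc =>
      let i := (st.1.get? jc.2).getD jc.1        -- i = seen.setdefault(c, j): returned value
      (st.1.setdefault jc.2 jc.1,
       st.2 ++ [extracted_datas.map (fun data => (PySem.List.pyGet? data i).getD 0)]))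
    (PySem.Dict.empty, [])
  (PySem.List.pyRange 0 (extracted_datas.length : Int) 1).map (fun r =>
    st.2.map (fun col => (PySem.List.pyGet? col r).getD 0))

-- ===== PRECONDITION & SPEC =====
-- Pre_ excludes exactly the inputs where Python A raises IndexError: some row is too short for a
-- needed (first-occurrence) column index.
def Pre_prepare_insert_row (extracted_datas : List (List Int)) (related_columns : List Int) : Prop :=
  ∀ ed ∈ extracted_datas, ∀ c ∈ related_columns, ((PySem.List.index? related_columns c).getD 0) < ed.length
instance (extracted_datas : List (List Int)) (related_columns : List Int) : Decidable (Pre_prepare_insert_row extracted_datas related_columns) := by unfold Pre_prepare_insert_row; infer_instance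
def pvWitness_prepare_insert_row : List (List Int) × List Int := ([[1, 2], [3, 4]], [10, 20])

def Spec_prepare_insert_row (extracted_datas : List (List Int)) (related_columns : List Int) (out : List (List Int)) : Prop := out = prepare_insert_row_alt extracted_datas related_columns
instance (extracted_datas : List (List Int)) (related_columns : List Int) (out : List (List Int)) : Decidable (Spec_prepare_insert_row extracted_datas related_columns out) := by unfold Spec_prepare_insert_row; infer_instance

-- ===== CLAIM (what is proved, stated in full; the proofs are below) =====
def Claim_equal_prepare_insert_row : Prop := ∀ (extracted_datas : List (List Int)) (related_columns : List Int), Dom_prepare_insert_row extracted_datas related_columns → Pre_prepare_insert_row extracted_datas related_columns → Spec_prepare_insert_row extracted_datas related_columns (prepare_insert_row extracted_datas related_columns)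

-- ===== LEMMAS AND PROOFS =====

theorem pv_foldl_app {α β : Type} (l : List α) (f : α → β) (acc : List β) :
    l.foldl (fun r x => r ++ [f x]) acc = acc ++ l.map f := by
  induction l generalizing acc with
  | nil => simp
  | cons x xs ih => simp [List.foldl, ih]

-- stage-1 invariant: the dict holds first-occurrence indices of the processed prefix, and the
-- accumulated columns are exactly the first-occurrence-selected columns of the full list
theorem pv_fold_cols (eds : List (List Int)) (rest : List Int) :
    ∀ (pre : List Int) (d : PySem.Dict Int Int) (acc : List (List Int)),
    (∀ c, d.get? c = (PySem.List.index? pre c).map (fun n => (n : Int))) →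
    ((PySem.List.enumerate rest ((pre.length : Nat) : Int)).foldl
      (fun (st : PySem.Dict Int Int × List (List Int)) jc =>
        (st.1.setdefault jc.2 jc.1,
         st.2 ++ [eds.map (fun data => (PySem.List.pyGet? data ((st.1.get? jc.2).getD jc.1)).getD 0)]))
      (d, acc)).2
    = acc ++ rest.map (fun c => eds.map (fun data =>
        (PySem.List.pyGet? data (((PySem.List.index? (pre ++ rest) c).getD 0 : Nat) : Int)).getD 0)) := by
  induction rest with
  | nil => intro pre d acc _; simp [PySem.List.enumerate_nil]
  | cons c rest ih =>
    intro pre d acc hd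
    rw [PySem.List.enumerate_cons, List.foldl_cons]
    have hidx : (d.get? c).getD ((pre.length : Nat) : Int)
        = (((PySem.List.index? (pre ++ c :: rest) c).getD 0 : Nat) : Int) := by
      rw [hd c]
      by_cases hmem : c ∈ pre
      · rw [PySem.List.index?_append_of_mem _ hmem]
        obtain ⟨k, hk⟩ := Option.isSome_iff_exists.mp ((PySem.List.index?_isSome_iff pre c).mpr hmem)
        rw [hk]; simp
      · have hnone : PySem.List.index? pre c = none := (PySem.List.index?_eq_none_iff pre c).mpr hmem
        have h2 : PySem.List.index? (pre ++ c :: rest) c = some pre.length := by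
          have h1 : pre ++ c :: rest = (pre ++ [c]) ++ rest := by simp
          rw [h1, PySem.List.index?_append_of_mem _ (by simp : c ∈ pre ++ [c]),
            PySem.List.index?_append_singleton_self _ _ hmem]
        rw [hnone, h2]; simp
    have hd' : ∀ c', (d.setdefault c ((pre.length : Nat) : Int)).get? c'
        = (PySem.List.index? (pre ++ [c]) c').map (fun n => (n : Int)) := by
      intro c'
      by_cases hc : c' = c
      · subst hc
        rw [PySem.Dict.get?_setdefault_self, hd c']
        by_cases hmem : c' ∈ pre
        · rw [PySem.List.index?_append_of_mem _ hmem]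
          obtain ⟨k, hk⟩ :=
            Option.isSome_iff_exists.mp ((PySem.List.index?_isSome_iff pre c').mpr hmem)
          rw [hk]; simp
        · have hnone : PySem.List.index? pre c' = none :=
            (PySem.List.index?_eq_none_iff pre c').mpr hmem
          rw [PySem.List.index?_append_singleton_self _ _ hmem, hnone]
          simp
      · rw [PySem.Dict.get?_setdefault_of_ne _ _ hc, hd c']
        by_cases hmem : c' ∈ pre
        · rw [PySem.List.index?_append_of_mem _ hmem]
        · rw [(PySem.List.index?_eq_none_iff pre c').mpr hmem,
            (PySem.List.index?_eq_none_iff (pre ++ [c]) c').mpr (by simp [hmem, hc])]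
    have hlen : ((pre.length : Nat) : Int) + 1 = (((pre ++ [c]).length : Nat) : Int) := by
      simp only [List.length_append, List.length_cons, List.length_nil]; push_cast; ring
    simp only [hidx]
    rw [hlen, ih (pre ++ [c]) _ _ hd']
    have hassoc : (pre ++ [c]) ++ rest = pre ++ c :: rest := by simp
    rw [hassoc]
    simp only [List.map_cons, List.append_assoc, List.singleton_append]

-- stage-2: transposing a matrix whose columns are eds.map (h c) gives the row-major selection
theorem pv_transpose (eds : List (List Int)) (ks : List Int) (h : Int → List Int → Int) :
    (PySem.List.pyRange 0 (eds.length : Int) 1).map (fun r =>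
      (ks.map (fun c => eds.map (h c))).map (fun col => (PySem.List.pyGet? col r).getD 0))
    = eds.map (fun ed => ks.map (fun c => h c ed)) := by
  rw [PySem.List.pyRange_zero_natCast]
  apply List.ext_getElem
  · simp
  · intro k h1 h2
    simp only [List.getElem_map, List.getElem_range, List.map_map, Function.comp_def,
      PySem.List.pyGet?_natCast]
    have hk : k < eds.length := by simpa using h2
    congr 1
    funext c
    simp [List.getElem?_map, List.getElem?_eq_getElem hk]

-- ===== VERDICT (by name: the statement is the Claim_ definition above) =====
theorem prepare_insert_row_spec : Claim_equal_prepare_insert_row := by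
  intro eds rcs _ _
  unfold Spec_prepare_insert_row prepare_insert_row prepare_insert_row_alt
  have hempty : ∀ c : Int, (PySem.Dict.empty : PySem.Dict Int Int).get? c
      = (PySem.List.index? ([] : List Int) c).map (fun n => (n : Int)) := by
    intro c; simp [PySem.List.index?_eq_idxOf?]
  have hfold := pv_fold_cols eds rcs [] PySem.Dict.empty [] hempty
  simp only [List.length_nil, Nat.cast_zero, List.nil_append] at hfold
  simp only [hfold]
  rw [pv_transpose eds rcs (fun c ed =>
    (PySem.List.pyGet? ed (((PySem.List.index? rcs c).getD 0 : Nat) : Int)).getD 0)]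
  simp only [pv_foldl_app, List.nil_append]
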